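-- pv_equiv track=rewrite | github.com/Kandru/vpnplane | src/vpnplane/wireguard.py | _only_peers_changed
-- ===== SOURCE A (Python) =====
-- def _only_peers_changed(old: str, new: str) -> bool:
--     """Heuristic: returns True if only [Peer] sections changed, not [Interface]."""
--     def extract_interface_block(conf: str) -> str:
--         lines = []
--         in_interface = False
--         for line in conf.splitlines():
--             stripped = line.strip()
--             if stripped == "[Interface]":
--                 in_interface = True
--             elif stripped.startswith("[") and stripped.endswith("]"):
--                 in_interface = False
--             if in_interface:
--                 lines.append(line)
--         return "\n".join(lines)
--
--     return extract_interface_block(old) == extract_interface_block(new)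
-- ===== SOURCE B (Python) =====
-- def _only_peers_changed(old: str, new: str) -> bool:
--     """Heuristic: returns True if only [Peer] sections changed, not [Interface]."""
--     def sections(conf: str):
--         # Phase 1: partition into (stripped header, lines incl. header) groups; preamble dropped.
--         secs = []
--         for line in conf.splitlines():
--             s = line.strip()
--             if s.startswith("[") and s.endswith("]"):
--                 secs.append((s, [line]))
--             elif secs:
--                 secs[-1][1].append(line)
--         return secs
--
--     def interface_text(conf: str) -> str:
--         # Phase 2: keep only [Interface] sections, in order.
--         out = []
--         for header, lines in sections(conf):
--             if header == "[Interface]":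
--                 out.extend(lines)
--         return "\n".join(out)
--
--     return interface_text(old) == interface_text(new)
-- ===== Notes on version B (the rewrite author's own statement) =====
-- stated objective: alternative
-- what changed: Replaces A's single stateful scan (an in_interface flag toggled line by line) by a two-phase decomposition: first partition the config into (header, lines) sections, then filter and join the [Interface] sections.
import Mathlib
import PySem

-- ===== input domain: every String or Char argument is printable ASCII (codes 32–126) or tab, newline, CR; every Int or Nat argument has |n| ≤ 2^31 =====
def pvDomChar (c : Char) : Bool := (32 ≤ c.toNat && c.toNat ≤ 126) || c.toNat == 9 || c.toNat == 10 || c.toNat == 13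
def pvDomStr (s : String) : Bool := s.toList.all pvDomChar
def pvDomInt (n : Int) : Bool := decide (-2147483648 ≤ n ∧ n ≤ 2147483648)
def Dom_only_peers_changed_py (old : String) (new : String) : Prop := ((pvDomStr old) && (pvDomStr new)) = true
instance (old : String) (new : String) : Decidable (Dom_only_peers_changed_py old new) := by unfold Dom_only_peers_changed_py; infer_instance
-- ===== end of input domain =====

-- B replaces A's single stateful scan (an in_interface flag) by a two-phase decomposition:
-- partition into (header, lines) sections, then filter the [Interface] sections and join.

-- ===== PORT A =====
-- loop body of extract_interface_block: state = (collected lines, in_interface)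
def opcStepA (st : List String × Bool) (line : String) : List String × Bool :=
  let stripped := PySem.Str.strip line
  let inI : Bool :=
    if stripped == "[Interface]" then true
    else if PySem.Str.startswith stripped "[" && PySem.Str.endswith stripped "]" then false
    else st.2
  ((if inI then st.1 ++ [line] else st.1), inI)

def opcExtractA (conf : String) : String :=
  PySem.Str.join "\n" ((PySem.Str.splitlines conf).foldl opcStepA ([], false)).1

def only_peers_changed_py (old : String) (new : String) : Bool :=
  opcExtractA old == opcExtractA new

-- ===== PORT B =====
-- Phase 1: partition into sections (stored reversed; append body line to the current head section)
def opcSecStep (acc : List (String × List String)) (line : String) : List (String × List String) :=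
  let s := PySem.Str.strip line
  if PySem.Str.startswith s "[" && PySem.Str.endswith s "]" then (s, [line]) :: acc
  else match acc with
    | [] => []
    | (h, ls) :: t => (h, ls ++ [line]) :: t

def opcSections (conf : String) : List (String × List String) :=
  ((PySem.Str.splitlines conf).foldl opcSecStep []).reverse

-- Phase 2: keep only [Interface] sections, in order
def opcInterfaceText (conf : String) : String :=
  PySem.Str.join "\n"
    ((opcSections conf).foldl
      (fun out sec => if sec.1 == "[Interface]" then out ++ sec.2 else out) [])

def only_peers_changed_py_alt (old : String) (new : String) : Bool :=
  opcInterfaceText old == opcInterfaceText new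

-- ===== PRECONDITION & SPEC =====
def Spec_only_peers_changed_py (old : String) (new : String) (out : Bool) : Prop := out = only_peers_changed_py_alt old new
instance (old : String) (new : String) (out : Bool) : Decidable (Spec_only_peers_changed_py old new out) := by unfold Spec_only_peers_changed_py; infer_instance

-- ===== CLAIM (what is proved, stated in full; the proofs are below) =====
def Claim_equal_only_peers_changed_py : Prop := ∀ (old : String) (new : String), Dom_only_peers_changed_py old new → Spec_only_peers_changed_py old new (only_peers_changed_py old new)

-- ===== LEMMAS AND PROOFS =====

-- the [Interface]-lines extracted from a reversed section list (B's phase 2, on B's fold state)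
def opcG (acc : List (String × List String)) : List String :=
  acc.reverse.foldl (fun out sec => if sec.1 == "[Interface]" then out ++ sec.2 else out) []

-- A's in_interface flag, read off B's fold state
def opcFlag (acc : List (String × List String)) : Bool :=
  match acc with
  | [] => false
  | (h, _) :: _ => h == "[Interface]"

theorem opcG_cons (x : String × List String) (acc : List (String × List String)) :
    opcG (x :: acc) = if x.1 == "[Interface]" then opcG acc ++ x.2 else opcG acc := by
  simp [opcG, List.foldl_append]

theorem opc_inv (ls : List String) (accA : List String) (flag : Bool)
    (accB : List (String × List String))
    (hflag : flag = opcFlag accB) (hacc : accA = opcG accB) :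
    (ls.foldl opcStepA (accA, flag)).1 = opcG (ls.foldl opcSecStep accB) := by
  induction ls generalizing accA flag accB with
  | nil => simpa using hacc
  | cons line rest ih =>
    simp only [List.foldl_cons]
    by_cases h1 : (PySem.Str.strip line == "[Interface]") = true
    · have hs : PySem.Str.strip line = "[Interface]" := by
        exact eq_of_beq h1
      have hbr : (PySem.Str.startswith (PySem.Str.strip line) "[" &&
          PySem.Str.endswith (PySem.Str.strip line) "]") = true := by
        rw [hs]; decide
      have hA : PySem.Chars.startswith ['[','I','n','t','e','r','f','a','c','e',']'] ['['] = true := by decide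
      have hB : PySem.Chars.endswith ['[','I','n','t','e','r','f','a','c','e',']'] [']'] = true := by decide
      apply ih
      · simp [opcSecStep, opcFlag, hs, hA, hB]
      · simp [opcStepA, opcSecStep, hs, hA, hB, opcG_cons, hacc]
    · have h1' : ¬ PySem.Str.strip line = "[Interface]" := by simpa using h1
      by_cases h2 : (PySem.Str.startswith (PySem.Str.strip line) "[" &&
          PySem.Str.endswith (PySem.Str.strip line) "]") = true
      · apply ih
        · have h2' := h2
          simp [Bool.and_eq_true] at h2'
          simp [opcSecStep, h2'.1, h2'.2, opcFlag, h1]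
        · have h2' := h2
          simp [Bool.and_eq_true] at h2'
          simp [opcStepA, opcSecStep, h1, h2'.1, h2'.2, opcG_cons, hacc]
      · have h2' : ¬(PySem.Chars.startswith (PySem.Chars.strip line.toList) ['['] = true ∧
            PySem.Chars.endswith (PySem.Chars.strip line.toList) [']'] = true) := by
          simpa [Bool.and_eq_true] using h2
        match accB with
        | [] =>
          have hf : flag = false := by simpa [opcFlag] using hflag
          apply ih
          · simp [opcSecStep, h1', h2', opcFlag, hf]
          · simp [h1, h2, h2', hf, hacc, opcSecStep, opcG]
        | (h, l) :: t =>
          have hf : flag = (h == "[Interface]") := by simpa [opcFlag] using hflag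
          by_cases hI : (h == "[Interface]") = true
          · apply ih
            · simp [opcSecStep, h1', h2', opcFlag, hf, hI]
            · simp [opcStepA, h1, h2', hf, hI, hacc, opcSecStep, opcG_cons, List.append_assoc]
          · apply ih
            · simp [opcSecStep, h1', h2', opcFlag, hf, hI]
            · simp [opcStepA, h1, h2', hf, hI, hacc, opcSecStep, opcG_cons]

theorem opc_extract_eq (conf : String) : opcExtractA conf = opcInterfaceText conf := by
  unfold opcExtractA opcInterfaceText opcSections
  rw [opc_inv (PySem.Str.splitlines conf) [] false [] (by simp [opcFlag]) (by simp [opcG])]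
  rfl

-- ===== VERDICT (by name: the statement is the Claim_ definition above) =====
theorem only_peers_changed_py_spec : Claim_equal_only_peers_changed_py := by
  intro old new _
  unfold Spec_only_peers_changed_py only_peers_changed_py only_peers_changed_py_alt
  rw [opc_extract_eq, opc_extract_eq]
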